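-- pv_equiv track=rewrite | github.com/exo7math/python1-exo7 | chercher/chercher_idees.py | regex_chercher_joker
-- ===== SOURCE A (Python) =====
-- def regex_chercher_joker(chaine,exp):
--
--     long_chaine = len(chaine)
--     long_exp = len(exp)
--
--     for i in range(long_chaine-long_exp+1):
--         trouve = True
--         for j in range(long_exp):
--             if exp[j] != "." and chaine[i+j] != exp[j]:
--                 trouve = False
--                 break
--         if trouve == True:
--             return chaine[i:i+long_exp],i,i+long_exp
--     return None
-- ===== SOURCE B (Python) =====
-- def regex_chercher_joker(chaine, exp):
--     # Column-wise candidate filtering: keep surviving start positions per pattern column.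
--     n = len(chaine)
--     m = len(exp)
--     cands = list(range(n - m + 1))
--     for j, c in enumerate(exp):
--         if c != '.':
--             cands = [i for i in cands if chaine[i + j] == c]
--             if not cands:
--                 return None
--     if not cands:
--         return None
--     i = cands[0]
--     return chaine[i:i + m], i, i + m
-- ===== Notes on version B (the rewrite author's own statement) =====
-- stated objective: alternative
-- what changed: Replaced A's row-wise scan (try every start position, compare the whole pattern with an inner break) by column-wise candidate filtering: keep the list of surviving start positions and filter it once per non-wildcard pattern column, returning the smallest survivor.
import Mathlib
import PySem

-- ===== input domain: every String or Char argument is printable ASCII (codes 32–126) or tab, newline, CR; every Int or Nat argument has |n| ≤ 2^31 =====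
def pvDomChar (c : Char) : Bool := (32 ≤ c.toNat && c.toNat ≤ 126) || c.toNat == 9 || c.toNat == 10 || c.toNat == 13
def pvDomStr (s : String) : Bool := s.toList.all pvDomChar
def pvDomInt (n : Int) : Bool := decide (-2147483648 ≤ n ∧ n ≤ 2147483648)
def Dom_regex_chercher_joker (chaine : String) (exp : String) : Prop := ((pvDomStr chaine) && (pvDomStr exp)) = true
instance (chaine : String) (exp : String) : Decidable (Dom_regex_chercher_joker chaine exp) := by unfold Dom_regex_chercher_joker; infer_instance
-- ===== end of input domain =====

-- B replaces A's row-wise per-start scan by column-wise filtering of the surviving start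
-- positions (objective: alternative algorithm of the same cost); return values are identical.

-- ===== PORT A =====
-- inner 'for j in range(long_exp)' loop with break, iterated over exp's (char, index) pairs;
-- chaine[i+j] is ported with pyGetD: in every call 0 ≤ i ≤ len(chaine)-len(exp) and j < len(exp),
-- so the index is in range and pyGetD is exact.
def pvInnerA (c : List Char) (i : Int) : List (Int × Char) → Bool
  | [] => true
  | (j, ch) :: rest =>
      if ch != '.' && PySem.List.pyGetD c (i + j) ' ' != ch then false
      else pvInnerA c i rest

-- outer 'for i in range(long_chaine - long_exp + 1)' loop with early return
def pvOuterA (c : List Char) (e : List (Int × Char)) (m : Int) : List Int → Option (String × Int × Int)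
  | [] => none
  | i :: rest =>
      if pvInnerA c i e then
        some (String.ofList (PySem.List.slice c (some i) (some (i + m))), i, i + m)
      else pvOuterA c e m rest

def regex_chercher_joker (chaine : String) (exp : String) : Option (String × Int × Int) :=
  let c := chaine.toList
  let e := exp.toList
  pvOuterA c (PySem.List.enumerate e) (e.length : Int)
    (PySem.List.pyRange 0 ((c.length : Int) - (e.length : Int) + 1) 1)

-- ===== PORT B =====
-- 'for j, ch in enumerate(exp): if ch != ".": cands = [i for i in cands if chaine[i+j] == ch]';
-- returns none on the early 'if not cands: return None' (pyGetD exact: indices always in range).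
def pvFilterB (c : List Char) : List (Int × Char) → List Int → Option (List Int)
  | [], cands => some cands
  | (j, ch) :: rest, cands =>
      if ch != '.' then
        let cands' := cands.filter (fun i => PySem.List.pyGetD c (i + j) ' ' == ch)
        if cands'.isEmpty then none else pvFilterB c rest cands'
      else pvFilterB c rest cands

def regex_chercher_joker_alt (chaine : String) (exp : String) : Option (String × Int × Int) :=
  let c := chaine.toList
  let e := exp.toList
  let m : Int := (e.length : Int)
  match pvFilterB c (PySem.List.enumerate e) (PySem.List.pyRange 0 ((c.length : Int) - m + 1) 1) with
  | none => none
  | some [] => none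
  | some (i :: _) =>
      some (String.ofList (PySem.List.slice c (some i) (some (i + m))), i, i + m)

-- ===== PRECONDITION & SPEC =====
def Spec_regex_chercher_joker (chaine : String) (exp : String) (out : Option (String × Int × Int)) : Prop := out = regex_chercher_joker_alt chaine exp
instance (chaine : String) (exp : String) (out : Option (String × Int × Int)) : Decidable (Spec_regex_chercher_joker chaine exp out) := by unfold Spec_regex_chercher_joker; infer_instance

-- ===== CLAIM (what is proved, stated in full; the proofs are below) =====
def Claim_equal_regex_chercher_joker : Prop := ∀ (chaine : String) (exp : String), Dom_regex_chercher_joker chaine exp → Spec_regex_chercher_joker chaine exp (regex_chercher_joker chaine exp)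

-- ===== LEMMAS AND PROOFS =====

-- the match predicate both programs decide, column by column resp. row by row
def pvOk (c : List Char) (pairs : List (Int × Char)) (i : Int) : Bool :=
  pairs.all (fun p => p.2 == '.' || PySem.List.pyGetD c (i + p.1) ' ' == p.2)

theorem pvInnerA_eq_ok (c : List Char) (pairs : List (Int × Char)) (i : Int) :
    pvInnerA c i pairs = pvOk c pairs i := by
  induction pairs with
  | nil => rfl
  | cons p rest ih =>
      obtain ⟨j, ch⟩ := p
      simp only [pvInnerA, pvOk, List.all_cons]
      by_cases h1 : ch = '.'
      · subst h1; simp [ih, pvOk]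
      · by_cases h2 : PySem.List.pyGetD c (i + j) ' ' = ch
        · simp [h2, ih, pvOk]
        · simp [h1, h2]

theorem pvOuterA_eq_head_filter (c : List Char) (e : List (Int × Char)) (m : Int)
    (l : List Int) :
    pvOuterA c e m l =
      ((l.filter (pvOk c e)).head?).map
        (fun i => (String.ofList (PySem.List.slice c (some i) (some (i + m))), i, i + m)) := by
  induction l with
  | nil => rfl
  | cons i rest ih =>
      simp only [pvOuterA, pvInnerA_eq_ok, List.filter_cons]
      by_cases h : pvOk c e i
      · simp [h]
      · simp [h, ih]

-- 'flatten' B's early-None: none and some [] both mean "no candidate left"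
def pvOptHead (o : Option (List Int)) : Option Int :=
  match o with
  | none => none
  | some l => l.head?

theorem pvFilterB_head (c : List Char) (pairs : List (Int × Char)) :
    ∀ cands : List Int,
      pvOptHead (pvFilterB c pairs cands) = (cands.filter (pvOk c pairs)).head? := by
  induction pairs with
  | nil =>
      intro cands
      have ht : pvOk c [] = fun _ => true := by funext i; simp [pvOk]
      simp only [pvFilterB, pvOptHead, ht]
      simp
  | cons p rest ih =>
      obtain ⟨j, ch⟩ := p
      intro cands
      simp only [pvFilterB]
      by_cases h1 : ch = '.'
      · subst h1
        simp only [bne_self_eq_false, Bool.false_eq_true, if_false]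
        rw [ih]
        have : cands.filter (pvOk c ((j, ('.' : Char)) :: rest)) = cands.filter (pvOk c rest) := by
          apply List.filter_congr
          intro i _
          simp [pvOk]
        rw [this]
      · have hne : (ch != '.') = true := by simp [h1]
        simp only [hne, if_true]
        have hsplit :
            cands.filter (pvOk c ((j, ch) :: rest)) =
              (cands.filter (fun i => PySem.List.pyGetD c (i + j) ' ' == ch)).filter
                (pvOk c rest) := by
          rw [List.filter_filter]
          apply List.filter_congr
          intro i _
          have hb : (ch == '.') = false := by simp [h1]
          simp [pvOk, hb, Bool.and_comm]
        by_cases he :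
            (cands.filter (fun i => PySem.List.pyGetD c (i + j) ' ' == ch)).isEmpty
        · simp only [he, if_true]
          rw [List.isEmpty_iff] at he
          simp [pvOptHead, hsplit, he]
        · simp only [he, Bool.false_eq_true, if_false]
          rw [ih, hsplit]

theorem pvBridge (c : List Char) (e : List (Int × Char)) (m : Int) (l : List Int) :
    (pvOptHead (pvFilterB c e l)).map
        (fun i => (String.ofList (PySem.List.slice c (some i) (some (i + m))), i, i + m)) =
      (match pvFilterB c e l with
        | none => none
        | some [] => none
        | some (i :: _) =>
            some (String.ofList (PySem.List.slice c (some i) (some (i + m))), i, i + m)) := by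
  cases h : pvFilterB c e l with
  | none => simp [pvOptHead]
  | some cands => cases cands <;> simp [pvOptHead]

-- ===== VERDICT (by name: the statement is the Claim_ definition above) =====
theorem regex_chercher_joker_spec : Claim_equal_regex_chercher_joker := by
  intro chaine exp _
  unfold Spec_regex_chercher_joker regex_chercher_joker regex_chercher_joker_alt
  rw [pvOuterA_eq_head_filter, ← pvFilterB_head, pvBridge]
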